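-- pv_equiv track=rewrite | github.com/stephanie12eg/Algorithms---Data-Structures | Codility/GenomicRangeQuery.py | solution
-- ===== SOURCE A (Python) =====
-- def solution(S, P, Q):
--     # write your code in Python 3.8.10
--     pass
--     R = []
--     for (c, d) in zip(P,Q): # ziping start and end ranges
--         if 'A' in S[c:d+1]: # slicing given S at starting point P and Q with Q included
--             R.append(1)
--         elif 'C' in S[c:d+1]:
--             R.append(2)
--         elif 'G' in S[c:d+1]:
--             R.append(3)
--         else:
--             R.append(4)
--
--     return R
-- ===== SOURCE B (Python) =====
-- def solution(S, P, Q):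
--     # Prefix counts per nucleotide, one pass over S; each query answered by a count difference.
--     n = len(S)
--     prefA, prefC, prefG = [0], [0], [0]
--     a = c = g = 0
--     for ch in S:
--         if ch == 'A':
--             a += 1
--         elif ch == 'C':
--             c += 1
--         elif ch == 'G':
--             g += 1
--         prefA.append(a)
--         prefC.append(c)
--         prefG.append(g)
--
--     def clamp(i):
--         # Python slice-bound semantics, so queries agree with S[c:d+1] for any ints
--         if i < 0:
--             i += n
--         if i < 0:
--             i = 0
--         if i > n:
--             i = n
--         return i
--
--     R = []
--     for (lo, hi) in zip(P, Q):
--         lo = clamp(lo)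
--         hi = clamp(hi + 1)
--         if prefA[hi] - prefA[lo] > 0:
--             R.append(1)
--         elif prefC[hi] - prefC[lo] > 0:
--             R.append(2)
--         elif prefG[hi] - prefG[lo] > 0:
--             R.append(3)
--         else:
--             R.append(4)
--     return R
-- ===== Notes on version B (the rewrite author's own statement) =====
-- stated objective: alternative
-- what changed: Replaced the per-query substring scan of S[c:d+1] by one pass that builds prefix-count arrays for A/C/G and answers each query by a count difference at clamped (Python-slice-semantics) bounds.
import Mathlib
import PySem

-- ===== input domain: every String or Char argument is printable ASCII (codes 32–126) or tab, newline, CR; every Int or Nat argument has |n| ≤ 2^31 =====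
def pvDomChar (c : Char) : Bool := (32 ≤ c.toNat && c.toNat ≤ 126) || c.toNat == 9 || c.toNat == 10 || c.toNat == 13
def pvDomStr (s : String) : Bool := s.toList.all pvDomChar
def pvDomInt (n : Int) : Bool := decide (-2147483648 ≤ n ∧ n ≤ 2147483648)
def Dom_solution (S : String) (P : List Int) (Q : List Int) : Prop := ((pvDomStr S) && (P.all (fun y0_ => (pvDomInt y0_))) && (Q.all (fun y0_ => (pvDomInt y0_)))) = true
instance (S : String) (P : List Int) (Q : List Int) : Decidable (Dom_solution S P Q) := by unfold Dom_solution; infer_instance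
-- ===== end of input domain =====

-- B replaces A's per-query substring scan by prefix-count arrays built in one pass over S; objective: alternative.

-- ===== PORT A =====
def solution (S : String) (P : List Int) (Q : List Int) : List Int :=
  (P.zip Q).foldl (fun R cd =>
    if PySem.Str.isIn "A" (PySem.Str.slice S (some cd.1) (some (cd.2 + 1))) then R ++ [1]
    else if PySem.Str.isIn "C" (PySem.Str.slice S (some cd.1) (some (cd.2 + 1))) then R ++ [2]
    else if PySem.Str.isIn "G" (PySem.Str.slice S (some cd.1) (some (cd.2 + 1))) then R ++ [3]
    else R ++ [4]) []

-- ===== PORT B =====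
-- one step of B's single pass over S: extend the three prefix lists and running counters
def pvPrefStep (st : List Int × List Int × List Int × Int × Int × Int) (ch : Char) :
    List Int × List Int × List Int × Int × Int × Int :=
  match st with
  | (pA, pC, pG, a, c, g) =>
    let acg : Int × Int × Int :=
      if ch = 'A' then (a + 1, c, g)
      else if ch = 'C' then (a, c + 1, g)
      else if ch = 'G' then (a, c, g + 1)
      else (a, c, g)
    (pA ++ [acg.1], pC ++ [acg.2.1], pG ++ [acg.2.2], acg.1, acg.2.1, acg.2.2)

-- Source B's clamp: Python slice-bound semantics
def pvClamp (n : Nat) (i : Int) : Int :=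
  let i1 := if i < 0 then i + n else i
  let i2 := if i1 < 0 then 0 else i1
  if i2 > (n : Int) then (n : Int) else i2

def solution_alt (S : String) (P : List Int) (Q : List Int) : List Int :=
  let cs := S.toList
  let n := cs.length
  let st := cs.foldl pvPrefStep ([0], [0], [0], 0, 0, 0)
  let pA := st.1
  let pC := st.2.1
  let pG := st.2.2.1
  (P.zip Q).foldl (fun R cd =>
    let lo := (pvClamp n cd.1).toNat
    let hi := (pvClamp n (cd.2 + 1)).toNat
    if pA.getD hi 0 - pA.getD lo 0 > 0 then R ++ [1]
    else if pC.getD hi 0 - pC.getD lo 0 > 0 then R ++ [2]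
    else if pG.getD hi 0 - pG.getD lo 0 > 0 then R ++ [3]
    else R ++ [4]) []

-- ===== PRECONDITION & SPEC =====
def Spec_solution (S : String) (P : List Int) (Q : List Int) (out : List Int) : Prop := out = solution_alt S P Q
instance (S : String) (P : List Int) (Q : List Int) (out : List Int) : Decidable (Spec_solution S P Q out) := by unfold Spec_solution; infer_instance

-- ===== CLAIM (what is proved, stated in full; the proofs are below) =====
def Claim_equal_solution : Prop := ∀ (S : String) (P : List Int) (Q : List Int), Dom_solution S P Q → Spec_solution S P Q (solution S P Q)

-- ===== LEMMAS AND PROOFS =====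

-- per-query values, used to turn both folds into maps
def pvQA (S : String) (cd : Int × Int) : Int :=
  if PySem.Str.isIn "A" (PySem.Str.slice S (some cd.1) (some (cd.2 + 1))) then 1
  else if PySem.Str.isIn "C" (PySem.Str.slice S (some cd.1) (some (cd.2 + 1))) then 2
  else if PySem.Str.isIn "G" (PySem.Str.slice S (some cd.1) (some (cd.2 + 1))) then 3
  else 4

def pvF (cs : List Char) (x : Char) (i : Nat) : Int := ((cs.take i).count x : Int)

def pvMk (t : List Char) : List Int × List Int × List Int × Int × Int × Int :=
  ((List.range (t.length + 1)).map (pvF t 'A'),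
   (List.range (t.length + 1)).map (pvF t 'C'),
   (List.range (t.length + 1)).map (pvF t 'G'),
   (t.count 'A' : Int), (t.count 'C' : Int), (t.count 'G' : Int))

theorem pvMapTake_append (t : List Char) (ch x : Char) :
    (List.range (t.length + 1 + 1)).map (pvF (t ++ [ch]) x)
      = (List.range (t.length + 1)).map (pvF t x) ++ [((t ++ [ch]).count x : Int)] := by
  rw [List.range_succ, List.map_append]
  congr 1
  · apply List.map_congr_left
    intro i hi
    have hi' : i ≤ t.length := by simpa [Nat.lt_succ_iff] using hi
    simp [pvF, List.take_append_of_le_length hi']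
  · have ht : (t ++ [ch]).take (t.length + 1) = t ++ [ch] :=
      List.take_of_length_le (by simp)
    simp [pvF, ht, List.count_append]

theorem pvStep_mk (t : List Char) (ch : Char) :
    pvPrefStep (pvMk t) ch = pvMk (t ++ [ch]) := by
  unfold pvPrefStep pvMk
  simp only []
  by_cases hA : ch = 'A' <;> by_cases hC : ch = 'C' <;> by_cases hG : ch = 'G' <;>
    simp_all [pvMapTake_append]

theorem pvFoldl_pref (cs t : List Char) :
    cs.foldl pvPrefStep (pvMk t) = pvMk (t ++ cs) := by
  induction cs generalizing t with
  | nil => simp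
  | cons ch cs ih =>
    rw [List.foldl_cons, pvStep_mk, ih]
    simp

theorem pvClamp_toNat (n : Nat) (i : Int) :
    (pvClamp n i).toNat = PySem.List.clampIdx n i := by
  simp only [pvClamp, PySem.List.clampIdx]
  split_ifs <;> omega

theorem pvClamp_le (n : Nat) (i : Int) : (pvClamp n i).toNat ≤ n := by
  simp only [pvClamp]
  split_ifs <;> omega

theorem pvSingleton_infix_iff (x : Char) (l : List Char) : [x] <:+: l ↔ x ∈ l := by
  constructor
  · intro h; exact h.subset (by simp)
  · intro h
    obtain ⟨a, b, rfl⟩ := List.mem_iff_append.mp h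
    exact ⟨a, b, by simp⟩

theorem pvDiff_pos_iff (cs : List Char) (x : Char) (a b : Nat) :
    (0 < pvF cs x b - pvF cs x a) ↔ x ∈ (cs.drop a).take (b - a) := by
  unfold pvF
  by_cases hab : b ≤ a
  · have h0 : b - a = 0 := by omega
    have hle : (cs.take b).count x ≤ (cs.take a).count x := by
      have : cs.take b = (cs.take a).take b := by
        rw [List.take_take, Nat.min_eq_left hab]
      rw [this]
      exact (List.take_sublist _ _).count_le x
    simp [h0]
    omega
  · have hab' : a ≤ b := by omega
    have hseg : (cs.drop a).take (b - a) = (cs.take b).drop a := by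
      rw [List.drop_take]
    have hcnt : (cs.take b).count x
        = (cs.take a).count x + ((cs.take b).drop a).count x := by
      conv_lhs => rw [← List.take_append_drop a (cs.take b)]
      rw [List.count_append, List.take_take, Nat.min_eq_left hab']
    rw [hseg, ← List.count_pos_iff]
    omega

theorem pvQuery (cs : List Char) (x : Char) (c d : Int) :
    (PySem.Chars.isIn [x] (PySem.List.slice cs (some c) (some (d + 1))) = true)
      ↔ 0 < ((List.range (cs.length + 1)).map (pvF cs x)).getD (pvClamp cs.length (d + 1)).toNat 0
            - ((List.range (cs.length + 1)).map (pvF cs x)).getD (pvClamp cs.length c).toNat 0 := by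
  rw [PySem.Chars.isIn_iff_infix, pvSingleton_infix_iff]
  rw [PySem.List.getD_map_range _ _ _ _ (by have := pvClamp_le cs.length (d + 1); omega)]
  rw [PySem.List.getD_map_range _ _ _ _ (by have := pvClamp_le cs.length c; omega)]
  rw [pvClamp_toNat, pvClamp_toNat]
  rw [pvDiff_pos_iff cs x]
  simp [PySem.List.slice]

theorem pvSolA_map (S : String) (P Q : List Int) :
    solution S P Q = (P.zip Q).map (pvQA S) := by
  unfold solution
  have h : (fun (R : List Int) (cd : Int × Int) =>
      if PySem.Str.isIn "A" (PySem.Str.slice S (some cd.1) (some (cd.2 + 1))) then R ++ [1]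
      else if PySem.Str.isIn "C" (PySem.Str.slice S (some cd.1) (some (cd.2 + 1))) then R ++ [2]
      else if PySem.Str.isIn "G" (PySem.Str.slice S (some cd.1) (some (cd.2 + 1))) then R ++ [3]
      else R ++ [4]) = fun R cd => R ++ [pvQA S cd] := by
    funext R cd
    unfold pvQA
    split_ifs <;> rfl
  rw [h, PySem.List.foldl_append_singleton_eq_map]
  simp

def pvQB (S : String) (cd : Int × Int) : Int :=
  if (pvMk S.toList).1.getD (pvClamp S.toList.length (cd.2 + 1)).toNat 0
      - (pvMk S.toList).1.getD (pvClamp S.toList.length cd.1).toNat 0 > 0 then 1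
  else if (pvMk S.toList).2.1.getD (pvClamp S.toList.length (cd.2 + 1)).toNat 0
      - (pvMk S.toList).2.1.getD (pvClamp S.toList.length cd.1).toNat 0 > 0 then 2
  else if (pvMk S.toList).2.2.1.getD (pvClamp S.toList.length (cd.2 + 1)).toNat 0
      - (pvMk S.toList).2.2.1.getD (pvClamp S.toList.length cd.1).toNat 0 > 0 then 3
  else 4

theorem pvQA_eq (S : String) (cd : Int × Int) : pvQA S cd = pvQB S cd := by
  unfold pvQA pvQB pvMk
  have hA : "A".toList = ['A'] := rfl
  have hC : "C".toList = ['C'] := rfl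
  have hG : "G".toList = ['G'] := rfl
  simp only [PySem.Str.isIn_eq, PySem.Str.toList_slice, PySem.Chars.slice_eq_listSlice,
    hA, hC, hG, gt_iff_lt]
  simp only [pvQuery]

theorem pvSolB_map (S : String) (P Q : List Int) :
    solution_alt S P Q = (P.zip Q).map (pvQB S) := by
  unfold solution_alt
  simp only []
  have hst : S.toList.foldl pvPrefStep ([0], [0], [0], 0, 0, 0) = pvMk S.toList := by
    have h0 : (([0], [0], [0], 0, 0, 0) : List Int × List Int × List Int × Int × Int × Int)
        = pvMk [] := by simp [pvMk, pvF, List.range_succ]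
    rw [h0, pvFoldl_pref]
    simp
  rw [hst]
  have h : (fun (R : List Int) (cd : Int × Int) =>
      let lo := (pvClamp S.toList.length cd.1).toNat
      let hi := (pvClamp S.toList.length (cd.2 + 1)).toNat
      if (pvMk S.toList).1.getD hi 0 - (pvMk S.toList).1.getD lo 0 > 0 then R ++ [1]
      else if (pvMk S.toList).2.1.getD hi 0 - (pvMk S.toList).2.1.getD lo 0 > 0 then R ++ [2]
      else if (pvMk S.toList).2.2.1.getD hi 0 - (pvMk S.toList).2.2.1.getD lo 0 > 0 then R ++ [3]
      else R ++ [4]) = fun R cd => R ++ [pvQB S cd] := by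
    funext R cd
    unfold pvQB
    dsimp only
    split_ifs <;> rfl
  rw [h, PySem.List.foldl_append_singleton_eq_map]
  simp

-- ===== VERDICT (by name: the statement is the Claim_ definition above) =====
theorem solution_spec : Claim_equal_solution := by
  intro S P Q _
  unfold Spec_solution
  rw [pvSolA_map, pvSolB_map]
  exact List.map_congr_left (fun cd _ => pvQA_eq S cd)
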